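-- pv_equiv track=rewrite | github.com/anounman/writerLm | notes_synthesizer/validators.py | _title_to_class_name
-- ===== SOURCE A (Python) =====
-- def _title_to_class_name(title: str) -> str:
--     parts = [part for part in re_split_non_alnum(title) if part]
--     candidate = "".join(part.capitalize() for part in parts[:4])
--     if not candidate:
--         candidate = "Example"
--     if candidate[0].isdigit():
--         candidate = f"Example{candidate}"
--     return candidate
--
-- def re_split_non_alnum(value: str) -> list[str]:
--     current: list[str] = []
--     parts: list[str] = []
--     for char in value:
--         if char.isalnum():
--             current.append(char)
--         elif current:
--             parts.append("".join(current))
--             current = []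
--     if current:
--         parts.append("".join(current))
--     return parts
-- ===== SOURCE B (Python) =====
-- def _title_to_class_name(title: str) -> str:
--     # One pass over the characters: build the CamelCase candidate directly,
--     # stopping after the fourth word, instead of splitting into a parts list first.
--     out = []
--     words = 0
--     in_word = False
--     for ch in title:
--         if ch.isalnum():
--             if in_word:
--                 out.append(ch.lower())
--             else:
--                 words += 1
--                 if words > 4:
--                     break
--                 out.append(ch.upper())
--                 in_word = True
--         else:
--             in_word = False
--     candidate = "".join(out)
--     if not candidate:
--         return "Example"
--     if candidate[0].isdigit():
--         return "Example" + candidate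
--     return candidate
-- ===== Notes on version B (the rewrite author's own statement) =====
-- stated objective: alternative
-- what changed: B replaces A's split-into-runs pass plus a second capitalize-and-join pass with a single character pass that emits the CamelCase candidate directly and stops early after the fourth word.
import Mathlib
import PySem

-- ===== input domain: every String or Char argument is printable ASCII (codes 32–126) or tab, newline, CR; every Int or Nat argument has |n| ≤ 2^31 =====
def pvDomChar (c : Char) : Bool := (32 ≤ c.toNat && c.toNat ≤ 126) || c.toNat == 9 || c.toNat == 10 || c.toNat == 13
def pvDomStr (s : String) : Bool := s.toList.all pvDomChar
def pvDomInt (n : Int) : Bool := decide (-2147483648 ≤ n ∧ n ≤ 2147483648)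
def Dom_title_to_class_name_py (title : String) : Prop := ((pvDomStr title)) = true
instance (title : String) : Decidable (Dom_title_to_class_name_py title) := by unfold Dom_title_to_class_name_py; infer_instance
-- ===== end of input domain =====

-- B builds the CamelCase candidate in one character pass (early exit after the 4th word)
-- instead of A's split-into-runs pass followed by a capitalize-and-join pass: alternative decomposition, same cost.

-- ===== PORT A =====
-- str.capitalize, exact on the ASCII domain (first char upper-cased, rest lower-cased)
def pvCap : List Char → List Char
  | [] => []
  | c :: rest => PySem.Chars.upperChar c :: rest.map PySem.Chars.lowerChar

def pvStepA (st : List Char × List (List Char)) (c : Char) : List Char × List (List Char) :=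
  if PySem.Chars.isalnum c then (st.1 ++ [c], st.2)
  else if !st.1.isEmpty then ([], st.2 ++ [st.1])
  else st

def pvReSplit (value : List Char) : List (List Char) :=
  let st := value.foldl pvStepA ([], [])
  if !st.1.isEmpty then st.2 ++ [st.1] else st.2

def title_to_class_name_py (title : String) : String :=
  let parts := (pvReSplit title.toList).filter (fun p => !p.isEmpty)
  let candidate := ((parts.take 4).map pvCap).flatten
  let candidate := if candidate.isEmpty then "Example".toList else candidate
  let candidate := if PySem.Chars.isdigit candidate.headI then "Example".toList ++ candidate
                   else candidate
  String.mk candidate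

-- ===== PORT B =====
def pvGoB : List Char → List Char → Nat → Bool → List Char
  | [], out, _, _ => out
  | c :: rest, out, words, inWord =>
    if PySem.Chars.isalnum c then
      if inWord then pvGoB rest (out ++ [PySem.Chars.lowerChar c]) words true
      else if words + 1 > 4 then out
      else pvGoB rest (out ++ [PySem.Chars.upperChar c]) (words + 1) true
    else pvGoB rest out words false

def title_to_class_name_py_alt (title : String) : String :=
  let candidate := pvGoB title.toList [] 0 false
  if candidate.isEmpty then "Example"
  else if PySem.Chars.isdigit candidate.headI then String.mk ("Example".toList ++ candidate)
  else String.mk candidate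

-- ===== PRECONDITION & SPEC =====
def Spec_title_to_class_name_py (title : String) (out : String) : Prop := out = title_to_class_name_py_alt title
instance (title : String) (out : String) : Decidable (Spec_title_to_class_name_py title out) := by unfold Spec_title_to_class_name_py; infer_instance

-- ===== CLAIM (what is proved, stated in full; the proofs are below) =====
def Claim_equal_title_to_class_name_py : Prop := ∀ (title : String), Dom_title_to_class_name_py title → Spec_title_to_class_name_py title (title_to_class_name_py title)

-- ===== LEMMAS AND PROOFS =====

theorem pvCap_snoc (cur : List Char) (c : Char) (h : cur ≠ []) :
    pvCap (cur ++ [c]) = pvCap cur ++ [PySem.Chars.lowerChar c] := by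
  cases cur with
  | nil => exact absurd rfl h
  | cons a t => simp [pvCap]

-- A's fold only ever appends to the parts component
theorem partsA_mono (cs : List Char) : ∀ (cur : List Char) (parts : List (List Char)),
    ∃ t, (List.foldl pvStepA (cur, parts) cs).2 = parts ++ t := by
  induction cs with
  | nil => intro cur parts; exact ⟨[], by simp⟩
  | cons c rest ih =>
    intro cur parts
    simp only [List.foldl_cons]
    cases halnum : PySem.Chars.isalnum c with
    | true =>
      rw [show pvStepA (cur, parts) c = (cur ++ [c], parts) from by simp [pvStepA, halnum]]
      exact ih _ parts
    | false =>
      cases hcur : cur.isEmpty with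
      | false =>
        rw [show pvStepA (cur, parts) c = ([], parts ++ [cur]) from by
          simp [pvStepA, halnum, hcur]]
        obtain ⟨t, ht⟩ := ih [] (parts ++ [cur])
        exact ⟨[cur] ++ t, by simpa using ht⟩
      | true =>
        rw [show pvStepA (cur, parts) c = (cur, parts) from by simp [pvStepA, halnum, hcur]]
        exact ih cur parts

-- every part A collects is nonempty
theorem partsA_ne (cs : List Char) : ∀ (cur : List Char) (parts : List (List Char)),
    (∀ p ∈ parts, p ≠ []) →
    (∀ p ∈ (let st := List.foldl pvStepA (cur, parts) cs;
            if !st.1.isEmpty then st.2 ++ [st.1] else st.2), p ≠ []) := by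
  induction cs with
  | nil =>
    intro cur parts hne
    simp only [List.foldl_nil]
    split_ifs with h
    · intro p hp
      rcases List.mem_append.mp hp with h' | h'
      · exact hne p h'
      · simp only [List.mem_singleton] at h'; subst h'
        simpa [List.isEmpty_iff] using h
    · exact hne
  | cons c rest ih =>
    intro cur parts hne
    simp only [List.foldl_cons]
    cases halnum : PySem.Chars.isalnum c with
    | true =>
      rw [show pvStepA (cur, parts) c = (cur ++ [c], parts) from by simp [pvStepA, halnum]]
      exact ih _ parts hne
    | false =>
      cases hcur : cur.isEmpty with
      | false =>
        rw [show pvStepA (cur, parts) c = ([], parts ++ [cur]) from by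
          simp [pvStepA, halnum, hcur]]
        refine ih [] (parts ++ [cur]) ?_
        intro p hp
        rcases List.mem_append.mp hp with h' | h'
        · exact hne p h'
        · simp only [List.mem_singleton] at h'; subst h'
          simpa [List.isEmpty_iff] using hcur
      | true =>
        rw [show pvStepA (cur, parts) c = (cur, parts) from by simp [pvStepA, halnum, hcur]]
        exact ih cur parts hne

-- main invariant: B's one-pass loop computes the capitalized join of the first four words
-- that A's finished-and-take-4'd fold produces
theorem main_inv (cs : List Char) : ∀ (cur out : List Char) (parts : List (List Char)),
    parts.length + (if cur.isEmpty then 0 else 1) ≤ 4 →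
    out = ((parts ++ if cur.isEmpty then [] else [cur]).map pvCap).flatten →
    pvGoB cs out (parts.length + (if cur.isEmpty then 0 else 1)) (!cur.isEmpty)
      = (((let st := List.foldl pvStepA (cur, parts) cs;
           if !st.1.isEmpty then st.2 ++ [st.1] else st.2).take 4).map pvCap).flatten := by
  induction cs with
  | nil =>
    intro cur out parts hlen hout
    simp only [List.foldl_nil, pvGoB]
    cases hcur : cur.isEmpty with
    | true =>
      have hc : cur = [] := List.isEmpty_iff.mp hcur
      subst hc
      simp only [List.isEmpty_nil, if_true, Nat.add_zero,
        List.append_nil] at hlen hout ⊢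
      simp only [Bool.not_true, Bool.false_eq_true, if_false]
      rw [List.take_of_length_le hlen]
      exact hout
    | false =>
      simp only [hcur, Bool.false_eq_true, if_false, Bool.not_false, if_true] at hlen hout ⊢
      rw [List.take_of_length_le (by simp; omega)]
      exact hout
  | cons c rest ih =>
    intro cur out parts hlen hout
    simp only [List.foldl_cons]
    cases halnum : PySem.Chars.isalnum c with
    | true =>
      rw [show pvStepA (cur, parts) c = (cur ++ [c], parts) from by simp [pvStepA, halnum]]
      cases hcur : cur.isEmpty with
      | true =>
        have hc : cur = [] := List.isEmpty_iff.mp hcur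
        subst hc
        simp only [List.isEmpty_nil, if_true, Nat.add_zero, Bool.not_true,
          List.append_nil, List.nil_append] at hlen hout ⊢
        have hstep : ∀ w : Nat, pvGoB (c :: rest) out w false
            = if w + 1 > 4 then out
              else pvGoB rest (out ++ [PySem.Chars.upperChar c]) (w + 1) true := by
          intro w; simp [pvGoB, halnum]
        rw [hstep]
        by_cases h4 : parts.length + 1 > 4
        · -- break: B returns out; A keeps collecting, but take 4 discards the extra words
          rw [if_pos h4]
          have hp4 : parts.length = 4 := by omega
          obtain ⟨t, ht⟩ := partsA_mono rest [c] parts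
          have hfin : (if !(List.foldl pvStepA ([c], parts) rest).1.isEmpty then
                (List.foldl pvStepA ([c], parts) rest).2 ++ [(List.foldl pvStepA ([c], parts) rest).1]
              else (List.foldl pvStepA ([c], parts) rest).2)
              = parts ++ (if !(List.foldl pvStepA ([c], parts) rest).1.isEmpty then
                  t ++ [(List.foldl pvStepA ([c], parts) rest).1] else t) := by
            split_ifs with h <;> simp [ht]
          rw [hfin, List.take_append_of_le_length (by omega), List.take_of_length_le (by omega)]
          exact hout
        · rw [if_neg h4]
          have := ih [c] (out ++ [PySem.Chars.upperChar c]) parts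
            (by simp; omega)
            (by simp [hout, pvCap])
          simpa using this
      | false =>
        have hc : cur ≠ [] := by simpa [List.isEmpty_iff] using hcur
        simp only [hcur, Bool.false_eq_true, if_false, Bool.not_false] at hlen hout ⊢
        rw [show pvGoB (c :: rest) out (parts.length + 1) true
            = pvGoB rest (out ++ [PySem.Chars.lowerChar c]) (parts.length + 1) true from by
          simp [pvGoB, halnum]]
        have hcur' : (cur ++ [c]).isEmpty = false := by simp
        have := ih (cur ++ [c]) (out ++ [PySem.Chars.lowerChar c]) parts
          (by simp [hcur']; omega)
          (by simp only [hcur', Bool.false_eq_true, if_false, List.map_append,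
                List.flatten_append, hout]
              simp [pvCap_snoc cur c hc])
        simp only [hcur', Bool.false_eq_true, if_false, Bool.not_false] at this
        exact this
    | false =>
      cases hcur : cur.isEmpty with
      | true =>
        have hc : cur = [] := List.isEmpty_iff.mp hcur
        subst hc
        simp only [List.isEmpty_nil, if_true, Nat.add_zero, Bool.not_true,
          List.append_nil] at hlen hout ⊢
        rw [show pvStepA ([], parts) c = ([], parts) from by simp [pvStepA, halnum]]
        rw [show pvGoB (c :: rest) out parts.length false
            = pvGoB rest out parts.length false from by simp [pvGoB, halnum]]
        have := ih [] out parts (by simpa using hlen) (by simpa using hout)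
        simpa using this
      | false =>
        have hc : cur ≠ [] := by simpa [List.isEmpty_iff] using hcur
        simp only [hcur, Bool.false_eq_true, if_false, Bool.not_false] at hlen hout ⊢
        rw [show pvStepA (cur, parts) c = ([], parts ++ [cur]) from by
          simp [pvStepA, halnum, hcur]]
        rw [show pvGoB (c :: rest) out (parts.length + 1) true
            = pvGoB rest out (parts.length + 1) false from by simp [pvGoB, halnum]]
        have := ih [] out (parts ++ [cur])
          (by simp; omega)
          (by simpa using hout)
        simpa using this

-- ===== VERDICT (by name: the statement is the Claim_ definition above) =====
theorem title_to_class_name_py_spec : Claim_equal_title_to_class_name_py := by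
  intro title _
  unfold Spec_title_to_class_name_py title_to_class_name_py title_to_class_name_py_alt
  have hne := partsA_ne title.toList [] [] (by simp)
  have hfilter : (pvReSplit title.toList).filter (fun p => !p.isEmpty) = pvReSplit title.toList := by
    apply List.filter_eq_self.mpr
    intro p hp
    simpa [List.isEmpty_iff] using hne p (by simpa [pvReSplit] using hp)
  have hmain := main_inv title.toList [] [] [] (by simp) (by simp)
  simp at hmain
  rw [hfilter]
  unfold pvReSplit
  by_cases hE : (pvGoB title.toList [] 0 false).isEmpty
  · simp [← hmain, hE]
    decide
  · simp [← hmain, hE]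
    split_ifs <;> rfl
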